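-- pv_equiv track=rewrite | github.com/pallavidhakne/Crypto_Assignment | ass5/bt20cse201_ass5.py | plaintextToState
-- ===== SOURCE A (Python) =====
-- def plaintextToState(plaintext):
--     blocks = []
--     states = []
--     for i in range(0, len(plaintext), 16):
--         blocks.append(plaintext[i:i+16])
--     if(len(blocks[-1]) < 16):
--         blocks[-1] += "0" * (16 - len(blocks[-1]))
--
--     for block in blocks:
--         state = [[], [], [], []]
--         for i in range(4):
--             for j in range(4):
--                 state[j].append(ord(block[4*i + j]))
--         states.append(state)
--     return states
-- ===== SOURCE B (Python) =====
-- def plaintextToState(plaintext):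
--     # Flat ord array + closed-form index gather: states[b][j][i] = ords[16*b + 4*i + j].
--     ords = [ord(c) for c in plaintext]
--     nblocks = (len(ords) + 15) // 16
--     ords += [48] * (16 * nblocks - len(ords))  # pad with ord('0') = 48
--     return [[[ords[16*b + 4*i + j] for i in range(4)] for j in range(4)]
--             for b in range(nblocks)]
-- ===== Notes on version B (the rewrite author's own statement) =====
-- stated objective: alternative
-- what changed: B never forms blocks: it builds one flat ord array padded with 48s and gathers each state cell by the closed-form index states[b][j][i] = ords[16*b+4*i+j], instead of A's chunk-into-16-char-blocks, patch-the-last-block and per-block nested column-scatter loops.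
import Mathlib
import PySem

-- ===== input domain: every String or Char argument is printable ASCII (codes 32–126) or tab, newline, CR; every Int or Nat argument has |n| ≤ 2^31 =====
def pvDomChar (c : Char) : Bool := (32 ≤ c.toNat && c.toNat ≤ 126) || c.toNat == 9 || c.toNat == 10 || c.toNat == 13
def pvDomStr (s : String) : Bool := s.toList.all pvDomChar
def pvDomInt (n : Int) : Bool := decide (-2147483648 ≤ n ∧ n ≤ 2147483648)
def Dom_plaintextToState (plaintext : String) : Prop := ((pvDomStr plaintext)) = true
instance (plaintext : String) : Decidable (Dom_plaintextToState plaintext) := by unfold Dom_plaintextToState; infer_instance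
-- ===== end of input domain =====

-- B replaces A's chunk-patch-scatter with a flat padded ord array read by the
-- closed-form index states[b][j][i] = ords[16*b+4*i+j] (objective: alternative).

-- ===== PORT A =====
def pvOrd (c : Char) : Int := (c.toNat : Int)

-- state[j].append(ord(block[4*i+j])) over the nested i,j loops; the pyGetD default
-- is unreachable on inputs admitted by Pre_ (every block has length 16 there).
def pvStateA (block : List Char) : List (List Int) :=
  (PySem.List.pyRange 0 4 1).foldl (fun st i =>
    (PySem.List.pyRange 0 4 1).foldl (fun st j =>
      st.modify j.toNat (fun row => row ++ [pvOrd (PySem.List.pyGetD block (4*i + j) '0')])) st)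
    [[], [], [], []]

def pvCoreA (cs : List Char) : List (List (List Int)) :=
  let blocks := (PySem.List.pyRange 0 (cs.length : Int) 16).foldl
      (fun bs i => bs ++ [PySem.List.slice cs (some i) (some (i + 16))]) []
  match PySem.List.pyGet? blocks (-1) with
  | none => []  -- Python raises IndexError at blocks[-1] here; excluded by Pre_
  | some last =>
    let blocks := if last.length < 16
      then blocks.dropLast ++ [last ++ List.replicate (16 - last.length) '0']
      else blocks
    blocks.foldl (fun sts b => sts ++ [pvStateA b]) []

def plaintextToState (plaintext : String) : List (List (List Int)) :=
  pvCoreA plaintext.toList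

-- ===== PORT B =====
-- ords[16*b + 4*i + j]: the index is always in range on B's padded array, so the
-- getD default 0 is unreachable.
def pvStateIdx (ords : List Int) (b : Nat) : List (List Int) :=
  (List.range 4).map (fun j => (List.range 4).map (fun i => ords.getD (16*b + 4*i + j) 0))

def plaintextToState_alt (plaintext : String) : List (List (List Int)) :=
  let ords := plaintext.toList.map pvOrd
  let nblocks := (ords.length + 15) / 16
  let padded := ords ++ List.replicate (16 * nblocks - ords.length) 48
  (List.range nblocks).map (fun b => pvStateIdx padded b)

-- ===== PRECONDITION & SPEC =====
-- A raises IndexError on the empty string (blocks[-1] on an empty list); nothing else is excluded.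
def Pre_plaintextToState (plaintext : String) : Prop := plaintext ≠ ""
instance (plaintext : String) : Decidable (Pre_plaintextToState plaintext) := by
  unfold Pre_plaintextToState; infer_instance

def pvWitness_plaintextToState : String := "A"

def Spec_plaintextToState (plaintext : String) (out : List (List (List Int))) : Prop :=
  out = plaintextToState_alt plaintext
instance (plaintext : String) (out : List (List (List Int))) : Decidable (Spec_plaintextToState plaintext out) := by
  unfold Spec_plaintextToState; infer_instance

-- ===== CLAIM (what is proved, stated in full; the proofs are below) =====
def Claim_equal_plaintextToState : Prop := ∀ (plaintext : String), Dom_plaintextToState plaintext → Pre_plaintextToState plaintext → Spec_plaintextToState plaintext (plaintextToState plaintext)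

-- ===== LEMMAS AND PROOFS =====

-- 16-character chunking, the shape of A's block list
def pvChunks (cs : List Char) : List (List Char) :=
  if h : cs = [] then [] else cs.take 16 :: pvChunks (cs.drop 16)
termination_by cs.length
decreasing_by
  simp only [List.length_drop]
  have : cs.length ≠ 0 := by simpa [List.length_eq_zero_iff] using h
  omega

theorem pvChunks_nil : pvChunks [] = [] := by simp [pvChunks]

theorem pvChunks_cons (cs : List Char) (h : cs ≠ []) :
    pvChunks cs = cs.take 16 :: pvChunks (cs.drop 16) := by
  rw [pvChunks]; simp [h]

theorem pvChunks_ne_nil (cs : List Char) (h : cs ≠ []) : pvChunks cs ≠ [] := by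
  rw [pvChunks_cons cs h]; simp

-- step-16 ranges unroll one element at a time
theorem pyRange16_nil (a b : Int) (h : b ≤ a) : PySem.List.pyRange a b 16 = [] := by
  rw [PySem.List.pyRange_of_pos a b (by norm_num)]
  simp [not_lt.mpr h]

theorem pyRange16_cons (a b : Int) (h : a < b) :
    PySem.List.pyRange a b 16 = a :: PySem.List.pyRange (a + 16) b 16 := by
  rw [PySem.List.pyRange_of_pos a b (by norm_num),
      PySem.List.pyRange_of_pos (a + 16) b (by norm_num)]
  by_cases h2 : a + 16 < b
  · have hn : b - a + 16 - 1 = (b - (a + 16) + 16 - 1) + 1 * 16 := by ring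
    have hdiv : (b - a + 16 - 1) / 16 = (b - (a + 16) + 16 - 1) / 16 + 1 := by
      rw [hn, Int.add_mul_ediv_right _ _ (by norm_num)]
    have hnn : 0 ≤ (b - (a + 16) + 16 - 1) / 16 := by
      apply Int.ediv_nonneg <;> omega
    have htn : ((b - a + 16 - 1) / 16).toNat = ((b - (a + 16) + 16 - 1) / 16).toNat + 1 := by
      omega
    rw [if_pos h, if_pos h2, htn, List.range_succ_eq_map, List.map_cons, List.map_map]
    congr 1
    · simp
    · apply List.map_congr_left; intro k _
      simp only [Function.comp_apply, Nat.succ_eq_add_one]; push_cast; ring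
  · have h1 : (b - a + 16 - 1) / 16 = 1 := by omega
    rw [if_pos h, if_neg h2, h1]
    simp

-- A's block-building loop is the 16-chunking of the input
theorem chunkFold (full : List Char) :
    ∀ (n k : Nat) (init : List (List Char)), full.length ≤ k + n →
      (PySem.List.pyRange (k : Int) (full.length : Int) 16).foldl
        (fun acc i => acc ++ [PySem.List.slice full (some i) (some (i + 16))]) init
      = init ++ pvChunks (full.drop k) := by
  intro n
  induction n with
  | zero =>
    intro k init h
    rw [pyRange16_nil _ _ (by exact_mod_cast (by omega : full.length ≤ k)), List.foldl_nil,
        List.drop_eq_nil_of_le (by omega), pvChunks_nil, List.append_nil]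
  | succ n ih =>
    intro k init h
    by_cases hk : full.length ≤ k
    · rw [pyRange16_nil _ _ (by exact_mod_cast hk), List.foldl_nil,
          List.drop_eq_nil_of_le hk, pvChunks_nil, List.append_nil]
    · have hk' : k < full.length := by omega
      rw [pyRange16_cons _ _ (by exact_mod_cast hk'), List.foldl_cons]
      have hsl : PySem.List.slice full (some (k : Int)) (some ((k : Int) + 16))
          = (full.drop k).take 16 := by
        rw [PySem.List.slice_toNat full (by positivity) (by positivity)]
        have h16 : ((k : Int) + 16).toNat = k + 16 := by omega
        simp [h16]
      have hrec := ih (k + 16) (init ++ [PySem.List.slice full (some (k : Int)) (some ((k : Int) + 16))]) (by omega)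
      rw [show ((k : Int) + 16) = ((k + 16 : Nat) : Int) by push_cast; ring] at *
      rw [hrec, pvChunks_cons (full.drop k) (by simp [List.drop_eq_nil_iff]; omega), hsl]
      simp [List.drop_drop]

-- A's last-block patch, as a structural function
def pvPadLast (bs : List (List Char)) : List (List Char) :=
  match bs with
  | [] => []
  | [b] => if b.length < 16 then [b ++ List.replicate (16 - b.length) '0'] else [b]
  | b :: rest => b :: pvPadLast rest

theorem pvPadLast_eq (bs : List (List Char)) (last : List Char) (h : bs.getLast? = some last) :
    pvPadLast bs = if last.length < 16 then bs.dropLast ++ [last ++ List.replicate (16 - last.length) '0'] else bs := by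
  induction bs with
  | nil => simp at h
  | cons b rest ih =>
    cases rest with
    | nil => simp at h; subst h; simp [pvPadLast]
    | cons c t =>
      have h' : (c :: t).getLast? = some last := by
        rw [← h]; exact (List.getLast?_cons_cons ..).symm
      have := ih h'
      show b :: pvPadLast (c :: t) = _
      rw [this]
      split_ifs <;> simp

-- patching the last chunk of cs equals chunking cs padded to a multiple of 16
theorem pad_chunks : ∀ (n : Nat) (cs : List Char), cs.length ≤ n → cs ≠ [] →
    pvPadLast (pvChunks cs) =
      pvChunks (cs ++ List.replicate ((16 - cs.length % 16) % 16) '0') := by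
  intro n
  induction n with
  | zero =>
    intro cs h hne
    exact absurd (List.length_eq_zero_iff.mp (Nat.le_zero.mp h)) hne
  | succ n ih =>
    intro cs h hne
    by_cases hlen : cs.length ≤ 16
    · rw [pvChunks_cons cs hne, List.drop_eq_nil_of_le hlen, pvChunks_nil,
          List.take_of_length_le hlen]
      by_cases he : cs.length = 16
      · have : (16 - cs.length % 16) % 16 = 0 := by omega
        rw [this, List.replicate_zero, List.append_nil, pvChunks_cons cs hne,
            List.drop_eq_nil_of_le hlen, pvChunks_nil, List.take_of_length_le hlen]
        simp [pvPadLast, he]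
      · have hlt : cs.length < 16 := by omega
        have hpos : cs.length ≠ 0 := by simpa [List.length_eq_zero_iff] using hne
        have hm : (16 - cs.length % 16) % 16 = 16 - cs.length := by omega
        rw [hm]
        rw [pvChunks_cons _ (fun hx => hne (List.append_eq_nil_iff.mp hx).1),
            List.drop_eq_nil_of_le (by simp; omega), pvChunks_nil,
            List.take_of_length_le (by simp; omega)]
        simp [pvPadLast, hlt]
    · have hgt : 16 < cs.length := by omega
      have hd : cs.drop 16 ≠ [] := by simp [List.drop_eq_nil_iff]; omega
      have hrest : pvChunks (cs.drop 16) ≠ [] := pvChunks_ne_nil _ hd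
      rw [pvChunks_cons cs hne]
      have hcons : pvPadLast (cs.take 16 :: pvChunks (cs.drop 16))
          = cs.take 16 :: pvPadLast (pvChunks (cs.drop 16)) := by
        cases hcz : pvChunks (cs.drop 16) with
        | nil => exact absurd hcz hrest
        | cons x xs => rfl
      rw [hcons, ih (cs.drop 16) (by rw [List.length_drop]; omega) hd]
      have hmod : (16 - (cs.drop 16).length % 16) % 16 = (16 - cs.length % 16) % 16 := by
        rw [List.length_drop]; omega
      rw [hmod]
      rw [pvChunks_cons (cs ++ _) (fun hx => hne (List.append_eq_nil_iff.mp hx).1)]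
      congr 1
      · rw [List.take_append_of_le_length (by omega)]
      · congr 1
        rw [List.drop_append_of_le_length (by omega)]

-- on a 16-character block, A's column scatter equals B's index gather at block 0
theorem state_eq16 : ∀ (b : List Char), b.length = 16 →
    pvStateA b = pvStateIdx (b.map pvOrd) 0 := by
  intro b h
  match b, h with
  | [a0,a1,a2,a3,a4,a5,a6,a7,a8,a9,a10,a11,a12,a13,a14,a15], _ => rfl

-- B's gather at block 0 only reads the first 16 ords
theorem stateIdx_take16 (M : List Int) : pvStateIdx (M.take 16) 0 = pvStateIdx M 0 := by
  unfold pvStateIdx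
  apply List.map_congr_left; intro j hj
  apply List.map_congr_left; intro i hi
  rw [List.mem_range] at hj hi
  have hlt : 4*i + j < 16 := by omega
  simp [List.getD_eq_getElem?_getD, hlt]

-- shifting the block index is dropping 16 ords
theorem stateIdx_succ (M : List Int) (b : Nat) :
    pvStateIdx M (b + 1) = pvStateIdx (M.drop 16) b := by
  unfold pvStateIdx
  apply List.map_congr_left; intro j _
  apply List.map_congr_left; intro i _
  have : 16*(b+1) + 4*i + j = 16 + (16*b + 4*i + j) := by ring
  simp [List.getD_eq_getElem?_getD, List.getElem?_drop, this]

-- the core: mapping A's per-block scatter over the 16-chunks is B's index gather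
theorem chunks_idx : ∀ (n : Nat) (P : List Char), P.length = 16 * n →
    (pvChunks P).map pvStateA = (List.range n).map (pvStateIdx (P.map pvOrd)) := by
  intro n
  induction n with
  | zero =>
    intro P h
    have hP : P = [] := List.length_eq_zero_iff.mp (by omega)
    subst hP
    simp [pvChunks_nil]
  | succ n ih =>
    intro P h
    have hne : P ≠ [] := by
      intro hx; rw [hx] at h; simp at h
    rw [pvChunks_cons P hne, List.map_cons, List.range_succ_eq_map, List.map_cons,
        List.map_map]
    congr 1
    · rw [state_eq16 (P.take 16) (by simp [List.length_take]; omega),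
          List.map_take, stateIdx_take16]
    · rw [ih (P.drop 16) (by rw [List.length_drop]; omega)]
      apply List.map_congr_left; intro b _
      simp only [Function.comp_apply, Nat.succ_eq_add_one]
      rw [Nat.add_comm b 1] at *
      rw [show 1 + b = b + 1 by omega, stateIdx_succ, List.map_drop]

theorem pyGet_neg_one {α : Type} (xs : List α) (h : xs ≠ []) :
    PySem.List.pyGet? xs (-1) = xs.getLast? := by
  have hl : 1 ≤ xs.length := List.length_pos_iff.mpr h
  simp [PySem.List.pyGet?, PySem.List.pyIdx?, hl, List.getLast?_eq_getElem?,
    List.getElem?_eq_getElem (by omega : xs.length - 1 < xs.length)]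

theorem core_eq (cs : List Char) (hne : cs ≠ []) :
    pvCoreA cs = (List.range ((cs.length + 15) / 16)).map
      (pvStateIdx (cs.map pvOrd ++ List.replicate (16 * ((cs.length + 15) / 16) - cs.length) 48)) := by
  have hpos : cs.length ≠ 0 := by simpa [List.length_eq_zero_iff] using hne
  have hA : (PySem.List.pyRange 0 ((cs.length : Nat) : Int) 16).foldl
      (fun bs i => bs ++ [PySem.List.slice cs (some i) (some (i + 16))]) []
      = pvChunks cs := by
    have := chunkFold cs cs.length 0 [] (by omega)
    simpa using this
  obtain ⟨last, hlast⟩ := Option.isSome_iff_exists.mp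
    (List.getLast?_isSome.mpr (pvChunks_ne_nil cs hne))
  set m := (16 - cs.length % 16) % 16 with hm
  set n := (cs.length + 15) / 16 with hn
  have hcount : 16 * n - cs.length = m := by omega
  have hpad : cs.map pvOrd ++ List.replicate (16 * n - cs.length) 48
      = (cs ++ List.replicate m '0').map pvOrd := by
    rw [hcount, List.map_append, List.map_replicate, show pvOrd '0' = 48 from rfl]
  have hlen16 : (cs ++ List.replicate m '0').length = 16 * n := by
    simp only [List.length_append, List.length_replicate, hm, hn]; omega
  rw [hpad]
  unfold pvCoreA
  simp only [hA, pyGet_neg_one _ (pvChunks_ne_nil cs hne), hlast]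
  rw [PySem.List.foldl_append_singleton_eq_map pvStateA, List.nil_append,
      ← pvPadLast_eq (pvChunks cs) last hlast,
      pad_chunks cs.length cs le_rfl hne, ← hm]
  exact chunks_idx n (cs ++ List.replicate m '0') hlen16

-- ===== VERDICT (by name: the statement is the Claim_ definition above) =====
theorem plaintextToState_spec : Claim_equal_plaintextToState := by
  intro s _ hpre
  unfold Spec_plaintextToState plaintextToState plaintextToState_alt
  have hne : s.toList ≠ [] := by simpa [String.toList_eq_nil_iff] using hpre
  simp only [List.length_map]
  exact core_eq s.toList hne
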